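-- pv_equiv track=rewrite | github.com/itumo-arigatone/auto_tsumu | src/python/tsumu.py | makeRoute
-- ===== SOURCE A (Python) =====
-- import math
--
-- def makeRoute(startNode, group, result):
--     start = startNode
--     nextFlag = False
--     gr = group
--     for i in gr:
--         x = (int(start["center_x"]) - int(i["center_x"])) ** 2
--         y = (int(start["center_y"]) - int(i["center_y"])) ** 2
--         if 0 < math.sqrt(x+y) <= 80:
--             result.append(i)
--             start = i
--             gr.remove(i)
--             nextFlag = True
--             break
--             # TODO breakを消して二つあったらつながる方を選ぶようにしたい
--     if not nextFlag:
--         return result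
--     return makeRoute(start, gr, result)
-- ===== SOURCE B (Python) =====
-- def makeRoute(startNode, group, result):
--     # Parse every node's coordinates once up front, then chain greedily on
--     # integers (squared-distance test, no repeated int() / sqrt per pass).
--     # Mutates `group` and `result` in place exactly like the original.
--     pend = [((int(i["center_x"]), int(i["center_y"])), i) for i in group]
--     if not pend:
--         return result
--     cur = (int(startNode["center_x"]), int(startNode["center_y"]))
--     while True:
--         pick = None
--         for k, (p, _node) in enumerate(pend):
--             dx = cur[0] - p[0]
--             dy = cur[1] - p[1]
--             d = dx * dx + dy * dy
--             if 0 < d <= 6400: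
--                 pick = k
--                 break
--         if pick is None:
--             return result
--         p, node = pend.pop(pick)
--         result.append(node)
--         group.remove(node)
--         cur = p
-- ===== Notes on version B (the rewrite author's own statement) =====
-- stated objective: alternative
-- what changed: Replaces A's tail recursion that re-parses int() coordinates and calls math.sqrt for every node on every pass by an iterative loop over a once-built list of (integer point, node) pairs, testing the squared distance (0 < d <= 6400) and popping the picked pair, so parsing happens once per node and no floating sqrt is used.
import Mathlib
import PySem

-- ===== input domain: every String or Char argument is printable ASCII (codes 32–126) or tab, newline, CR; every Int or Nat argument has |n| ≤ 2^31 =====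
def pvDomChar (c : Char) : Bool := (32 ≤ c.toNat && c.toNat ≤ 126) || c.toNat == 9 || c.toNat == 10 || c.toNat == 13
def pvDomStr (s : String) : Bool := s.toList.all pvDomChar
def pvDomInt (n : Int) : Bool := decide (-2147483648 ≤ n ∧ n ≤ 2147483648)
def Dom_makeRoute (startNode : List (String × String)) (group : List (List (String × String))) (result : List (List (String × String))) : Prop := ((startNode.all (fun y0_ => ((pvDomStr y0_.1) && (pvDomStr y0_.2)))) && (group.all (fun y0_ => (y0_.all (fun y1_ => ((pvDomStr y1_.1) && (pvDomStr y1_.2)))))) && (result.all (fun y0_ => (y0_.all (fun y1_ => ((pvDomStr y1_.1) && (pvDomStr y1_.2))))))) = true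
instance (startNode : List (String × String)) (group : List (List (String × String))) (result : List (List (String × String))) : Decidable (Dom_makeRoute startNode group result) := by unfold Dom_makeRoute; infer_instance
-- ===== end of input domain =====

-- B parses every node's coordinates once up front and chains greedily on integers
-- (squared-distance test) instead of re-running int()/sqrt on every pass; objective:
-- alternative/constant-factor. Both A and B mutate `group`/`result` in place the same
-- way; the equivalence proved here is about the return value.

-- dict lookup (first match) followed by int(): shared coordinate parser
def pvParse (d : List (String × String)) : Option (Int × Int) :=
  match (d.find? (fun p => p.1 == "center_x")).map (·.2) with
  | none => none
  | some sx =>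
    match (d.find? (fun p => p.1 == "center_y")).map (·.2) with
    | none => none
    | some sy =>
      match PySem.Int.ofStr? sx, PySem.Int.ofStr? sy with
      | some x, some y => some (x, y)
      | _, _ => none

-- ===== PORT A =====
-- A's for-loop with break: first i whose distance from start is in (0, 80]
def pvScanA (start : List (String × String)) : List (List (String × String)) → Option (List (String × String))
  | [] => none
  | i :: rest =>
    match pvParse start, pvParse i with
    | some s, some p =>
      let x := (s.1 - p.1) ^ 2
      let y := (s.2 - p.2) ^ 2
      if 0 < x + y ∧ x + y ≤ 6400 then some i else pvScanA start rest
    | _, _ => pvScanA start rest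

theorem pvScanA_mem (start i : List (String × String)) (gr : List (List (String × String)))
    (h : pvScanA start gr = some i) : i ∈ gr := by
  induction gr with
  | nil => simp [pvScanA] at h
  | cons g rest ih =>
    simp only [pvScanA] at h
    rcases hs : pvParse start with _ | s <;> rcases hp : pvParse g with _ | p <;>
      simp [hs, hp] at h
    · exact List.mem_cons_of_mem _ (ih h)
    · exact List.mem_cons_of_mem _ (ih h)
    · exact List.mem_cons_of_mem _ (ih h)
    · split at h
      · cases h; exact List.mem_cons_self
      · exact List.mem_cons_of_mem _ (ih h)

def makeRoute (startNode : List (String × String)) (group : List (List (String × String))) (result : List (List (String × String))) : List (List (String × String)) :=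
  match h : pvScanA startNode group with
  | none => result
  | some i => makeRoute i (group.erase i) (result ++ [i])
termination_by group.length
decreasing_by
  have hm := pvScanA_mem _ _ _ h
  have := List.length_erase_of_mem hm
  have hpos : 0 < group.length := List.length_pos_of_mem hm
  omega

-- ===== PORT B =====
-- Source B's list comprehension: parse all nodes, pairing each with its coordinates
def pvParseAll : List (List (String × String)) → Option (List ((Int × Int) × List (String × String)))
  | [] => some []
  | n :: rest =>
    match pvParse n with
    | none => none
    | some p => (pvParseAll rest).map (fun t => (p, n) :: t)

-- Source B's inner for-loop with enumerate + pop(pick): split pend at the first match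
def pvSplitB (cur : Int × Int) : List ((Int × Int) × List (String × String)) → Option (List ((Int × Int) × List (String × String)) × ((Int × Int) × List (String × String)) × List ((Int × Int) × List (String × String)))
  | [] => none
  | e :: rest =>
    let dx := cur.1 - e.1.1
    let dy := cur.2 - e.1.2
    let d := dx * dx + dy * dy
    if 0 < d ∧ d ≤ 6400 then some ([], e, rest)
    else (pvSplitB cur rest).map (fun t => (e :: t.1, t.2.1, t.2.2))

theorem pvSplitB_len (cur : Int × Int) (pend pre post : List ((Int × Int) × List (String × String)))
    (hit : (Int × Int) × List (String × String))
    (h : pvSplitB cur pend = some (pre, hit, post)) : pre.length + post.length < pend.length := by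
  induction pend generalizing pre with
  | nil => simp [pvSplitB] at h
  | cons e rest ih =>
    simp only [pvSplitB] at h
    split at h
    · cases h; simp
    · rcases hr : pvSplitB cur rest with _ | ⟨p', h', q'⟩ <;> simp [hr] at h
      rcases h with ⟨h1, h2, h3⟩
      subst h1 h2 h3
      have := ih _ hr
      simp only [List.length_cons]
      omega

-- Source B's while-True loop
def pvLoopB (cur : Int × Int) (pend : List ((Int × Int) × List (String × String))) (result : List (List (String × String))) : List (List (String × String)) :=
  match h : pvSplitB cur pend with
  | none => result
  | some t => pvLoopB t.2.1.1 (t.1 ++ t.2.2) (result ++ [t.2.1.2])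
termination_by pend.length
decreasing_by simpa using pvSplitB_len _ _ _ _ _ h

def makeRoute_alt (startNode : List (String × String)) (group : List (List (String × String))) (result : List (List (String × String))) : List (List (String × String)) :=
  match pvParseAll group with
  | none => result
  | some pend =>
    if pend.isEmpty then result
    else
      match pvParse startNode with
      | none => result
      | some cur => pvLoopB cur pend result

-- ===== PRECONDITION & SPEC =====
-- Pre_ excludes exactly the inputs on which A raises (KeyError/ValueError from
-- int(...["center_x"])): some node in group — or, when group is nonempty, startNode —
-- lacks an int-parsable "center_x"/"center_y".
def Pre_makeRoute (startNode : List (String × String)) (group : List (List (String × String))) (result : List (List (String × String))) : Prop :=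
  group.all (fun d => (pvParse d).isSome) = true ∧ (group ≠ [] → (pvParse startNode).isSome = true)
instance (startNode : List (String × String)) (group : List (List (String × String))) (result : List (List (String × String))) : Decidable (Pre_makeRoute startNode group result) := by unfold Pre_makeRoute; infer_instance

def pvWitness_makeRoute : (List (String × String)) × (List (List (String × String))) × (List (List (String × String))) :=
  ([("center_x", "0"), ("center_y", "0")], [[("center_x", "10"), ("center_y", "0")]], [])

def Spec_makeRoute (startNode : List (String × String)) (group : List (List (String × String))) (result : List (List (String × String))) (out : List (List (String × String))) : Prop := out = makeRoute_alt startNode group result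
instance (startNode : List (String × String)) (group : List (List (String × String))) (result : List (List (String × String))) (out : List (List (String × String))) : Decidable (Spec_makeRoute startNode group result out) := by unfold Spec_makeRoute; infer_instance

-- ===== CLAIM (what is proved, stated in full; the proofs are below) =====
def Claim_equal_makeRoute : Prop := ∀ (startNode : List (String × String)) (group : List (List (String × String))) (result : List (List (String × String))), Dom_makeRoute startNode group result → Pre_makeRoute startNode group result → Spec_makeRoute startNode group result (makeRoute startNode group result)

-- ===== LEMMAS AND PROOFS =====

-- node n is paired with entry e: e = (coords of n, n)
def pvRel (n : List (String × String)) (e : (Int × Int) × List (String × String)) : Prop :=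
  pvParse n = some e.1 ∧ e.2 = n

def pvCond (cur p : Int × Int) : Prop :=
  0 < (cur.1 - p.1) * (cur.1 - p.1) + (cur.2 - p.2) * (cur.2 - p.2) ∧
    (cur.1 - p.1) * (cur.1 - p.1) + (cur.2 - p.2) * (cur.2 - p.2) ≤ 6400

theorem pvParseAll_some (gr : List (List (String × String)))
    (h : gr.all (fun d => (pvParse d).isSome) = true) :
    ∃ pend, pvParseAll gr = some pend ∧ List.Forall₂ pvRel gr pend := by
  induction gr with
  | nil => exact ⟨[], rfl, List.Forall₂.nil⟩
  | cons n rest ih =>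
    simp only [List.all_cons, Bool.and_eq_true] at h
    rcases Option.isSome_iff_exists.mp h.1 with ⟨p, hp⟩
    rcases ih h.2 with ⟨t, ht, hrel⟩
    exact ⟨(p, n) :: t, by simp [pvParseAll, hp, ht], List.Forall₂.cons ⟨hp, rfl⟩ hrel⟩

theorem pvScan_split (start : List (String × String)) (cur : Int × Int)
    (gr : List (List (String × String))) (pend : List ((Int × Int) × List (String × String)))
    (hs : pvParse start = some cur)
    (hrel : List.Forall₂ pvRel gr pend) :
    (pvScanA start gr = none → pvSplitB cur pend = none) ∧
    (∀ i, pvScanA start gr = some i →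
      ∃ pre hit post, pvSplitB cur pend = some (pre, hit, post) ∧ hit.2 = i ∧
        pvParse i = some hit.1 ∧ pvCond cur hit.1 ∧
        List.Forall₂ pvRel (gr.erase i) (pre ++ post)) := by
  induction hrel with
  | nil =>
    constructor
    · intro _; rfl
    · intro i hi; simp [pvScanA] at hi
  | @cons g e rest pend' hge hrest ih =>
    obtain ⟨hpg, he2⟩ := hge
    by_cases hc : pvCond cur e.1
    · -- head matches in both
      have hc2 : 0 < (cur.1 - e.1.1) ^ 2 + (cur.2 - e.1.2) ^ 2 ∧
          (cur.1 - e.1.1) ^ 2 + (cur.2 - e.1.2) ^ 2 ≤ 6400 := by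
        obtain ⟨h1, h2⟩ := hc
        constructor <;> simp only [pow_two] <;> omega
      have hB : pvSplitB cur (e :: pend') = some ([], e, pend') := by
        simp only [pvSplitB]
        rw [if_pos]
        exact hc
      constructor
      · intro h
        simp only [pvScanA, hs, hpg] at h
        rw [if_pos hc2] at h
        exact absurd h (by simp)
      · intro i hi
        simp only [pvScanA, hs, hpg] at hi
        rw [if_pos hc2] at hi
        injection hi with hi
        subst hi
        refine ⟨[], e, pend', hB, he2, hpg, hc, ?_⟩
        rw [List.erase_cons_head]
        simpa using hrest
    · -- head matches in neither
      have hc2 : ¬ (0 < (cur.1 - e.1.1) ^ 2 + (cur.2 - e.1.2) ^ 2 ∧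
          (cur.1 - e.1.1) ^ 2 + (cur.2 - e.1.2) ^ 2 ≤ 6400) := by
        intro ⟨h1, h2⟩
        simp only [pow_two] at h1 h2
        exact hc ⟨h1, h2⟩
      have hA : pvScanA start (g :: rest) = pvScanA start rest := by
        simp only [pvScanA, hs, hpg]
        rw [if_neg hc2]
      have hB : pvSplitB cur (e :: pend') =
          (pvSplitB cur pend').map (fun t => (e :: t.1, t.2.1, t.2.2)) := by
        simp only [pvSplitB]
        rw [if_neg]
        exact hc
      constructor
      · intro h
        rw [hA] at h
        rw [hB, ih.1 h]
        rfl
      · intro i hi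
        rw [hA] at hi
        rcases ih.2 i hi with ⟨pre, hit, post, hsp, h2, h3, h4, h5⟩
        refine ⟨e :: pre, hit, post, by rw [hB, hsp]; rfl, h2, h3, h4, ?_⟩
        have hgi : ¬ (g == i) = true := by
          intro hb
          have hgi' : g = i := by simpa using hb
          subst hgi'
          rw [h3] at hpg
          injection hpg with hpg
          exact hc (hpg ▸ h4)
        rw [List.erase_cons, if_neg hgi]
        exact List.Forall₂.cons ⟨hpg, he2⟩ h5

theorem pvLoop_eq (n : Nat) : ∀ (gr : List (List (String × String))), gr.length = n →
    ∀ (start : List (String × String)) (cur : Int × Int)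
      (pend : List ((Int × Int) × List (String × String))) (result : List (List (String × String))),
      pvParse start = some cur → List.Forall₂ pvRel gr pend →
      makeRoute start gr result = pvLoopB cur pend result := by
  induction n using Nat.strong_induction_on with
  | _ n ih =>
    intro gr hlen start cur pend result hs hrel
    rw [makeRoute, pvLoopB]
    rcases hscan : pvScanA start gr with _ | i
    · rw [(pvScan_split start cur gr pend hs hrel).1 hscan]
    · rcases (pvScan_split start cur gr pend hs hrel).2 i hscan with
        ⟨pre, hit, post, hsp, h2, h3, h4, h5⟩
      rw [hsp]
      simp only
      have hmem := pvScanA_mem _ _ _ hscan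
      have hlt : (gr.erase i).length < n := by
        have := List.length_erase_of_mem hmem
        have := List.length_pos_of_mem hmem
        omega
      rw [h2]
      exact ih _ hlt _ rfl _ _ _ _ h3 h5

theorem makeRoute_spec : Claim_equal_makeRoute := by
  intro startNode group result _ hpre
  unfold Spec_makeRoute
  obtain ⟨hall, hstart⟩ := hpre
  rcases pvParseAll_some group hall with ⟨pend, hpa, hrel⟩
  unfold makeRoute_alt
  rw [hpa]
  dsimp only
  by_cases hg : group = []
  · subst hg
    cases hrel
    simp [makeRoute, pvScanA]
  · rcases Option.isSome_iff_exists.mp (hstart hg) with ⟨cur, hcur⟩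
    have hpe : pend.isEmpty = false := by
      cases hrel with
      | nil => exact absurd rfl hg
      | cons _ _ => rfl
    rw [hpe, hcur]
    simp only [Bool.false_eq_true, if_false]
    exact pvLoop_eq group.length group rfl startNode cur pend result hcur hrel
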